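-- pv_equiv track=rewrite | github.com/Bubb13/InfinityLoader | scripts/generate_bindings/generate_bindings.py | separateTemplateTypeParts
-- ===== SOURCE A (Python) =====
-- def separateTemplateTypeParts(str, startI=0):
-- 	bracketLevel = 0
-- 	name = None
-- 	for i in range(startI, len(str)):
-- 		char = str[i]
-- 		if char == "<":
-- 			bracketLevel += 1
-- 			startI = i + 1
-- 			name = str[0:i]
-- 			break
--
-- 	assert bracketLevel != 0
--
-- 	for i in range(startI, len(str)):
-- 		char = str[i]
-- 		if char == "<":
-- 			bracketLevel += 1
-- 		elif char == ">":
-- 			bracketLevel -= 1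
-- 			if bracketLevel == 0: return name, str[startI:i]
-- ===== SOURCE B (Python) =====
-- def separateTemplateTypeParts(str, startI=0):
-- 	# Find the name/args boundary with str.index, then hop between '>' candidates,
-- 	# deciding each by bracket counting on the slice -- no bracket-level counter is carried.
-- 	i = str.index("<", startI)
-- 	name = str[:i]
-- 	k = i
-- 	while True:
-- 		k = str.index(">", k + 1)
-- 		if str.count(">", i + 1, k + 1) == str.count("<", i + 1, k + 1) + 1:
-- 			return name, str[i + 1:k]
-- ===== Notes on version B (the rewrite author's own statement) =====
-- stated objective: alternative
-- what changed: Instead of scanning every character while maintaining a bracketLevel counter, B locates the first '<' with str.index, then hops directly between '>' positions via str.index and decides each candidate by comparing bracket counts (str.count) over the enclosed slice; no level counter is maintained. …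
-- outside the precondition, e.g. on separateTemplateTypeParts('<a>b', -1): A returns ('', 'a'), B raises ValueError; on separateTemplateTypeParts('a<b', 0): A returns None, B raises ValueError; on separateTemplateTypeParts('<', 0): A returns None, B raises ValueError
import Mathlib
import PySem

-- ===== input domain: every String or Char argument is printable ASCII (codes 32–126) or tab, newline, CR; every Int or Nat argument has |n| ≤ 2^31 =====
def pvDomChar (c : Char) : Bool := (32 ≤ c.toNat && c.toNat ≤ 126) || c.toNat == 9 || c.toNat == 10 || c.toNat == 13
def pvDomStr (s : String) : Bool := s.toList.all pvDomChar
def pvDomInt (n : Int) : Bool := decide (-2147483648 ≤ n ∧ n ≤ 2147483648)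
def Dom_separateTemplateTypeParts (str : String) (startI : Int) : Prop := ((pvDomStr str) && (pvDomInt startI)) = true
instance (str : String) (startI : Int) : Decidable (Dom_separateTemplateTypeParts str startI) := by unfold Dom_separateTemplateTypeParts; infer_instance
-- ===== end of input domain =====

-- B replaces A's level-counting character scan by index/count primitives: find the first '<'
-- with str.index, then hop between '>' positions and test each candidate by bracket counting
-- on the enclosed range (objective: alternative — no bracket-level counter is maintained).

-- ===== PORT A =====
-- first loop of A: scan for the first '<'; returns (i+1, str[0:i]) at the break,
-- none when the loop ends without a break (AssertionError follows) or on IndexError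
def pvALoop1 (str : String) : List Int → Option (Int × String)
  | [] => none
  | i :: rest =>
    match PySem.Str.pyGet? str i with
    | none => none  -- IndexError (outside Pre_)
    | some c =>
      if c = '<' then some (i + 1, PySem.Str.slice str (some 0) (some i))
      else pvALoop1 str rest

-- second loop of A, with the updated startI and the captured name
def pvALoop2 (str : String) (startI2 : Int) (name : String) : List Int → Int → Option (String × String)
  | [], _ => none
  | i :: rest, level =>
    match PySem.Str.pyGet? str i with
    | none => none  -- IndexError (outside Pre_)
    | some c =>
      if c = '<' then pvALoop2 str startI2 name rest (level + 1)
      else if c = '>' then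
        if level - 1 = 0 then some (name, PySem.Str.slice str (some startI2) (some i))
        else pvALoop2 str startI2 name rest (level - 1)
      else pvALoop2 str startI2 name rest level

def separateTemplateTypeParts (str : String) (startI : Int) : String × String :=
  match pvALoop1 str (PySem.List.pyRange startI (PySem.Str.len str)) with
  | none => ("", "")  -- AssertionError (bracketLevel == 0) or IndexError: outside Pre_
  | some (startI2, name) =>
    match pvALoop2 str startI2 name (PySem.List.pyRange startI2 (PySem.Str.len str)) 1 with
    | some r => r
    | none => ("", "")  -- Python falls through and returns None: outside Pre_

-- ===== PORT B =====
-- hand port of str.count(c, a, b), exact for the bounds used by B (0 ≤ a): counts the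
-- positions m in [a, b) with str[m] == c; positions ≥ len contribute nothing, which matches
-- Python's clamping of the end bound
def pvCountCh (str : String) (c : Char) (a b : Int) : Int :=
  ((PySem.List.pyRange a b).countP (fun m => PySem.Str.pyGet? str m == some c) : Int)

-- B's while-True loop: k = str.index('>', kprev+1) (PySem.Str.findFrom; -1 = ValueError),
-- return on the counting test, else continue from k.  The fuel only makes the recursion
-- well-founded; under Pre_ the test succeeds before it runs out.
def pvBSearch (str : String) (i : Int) (name : String) : Nat → Int → Option (String × String)
  | 0, _ => none
  | fuel + 1, kprev =>
    let k := PySem.Str.findFrom str ">" (kprev + 1) none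
    if k = -1 then none  -- str.index raises ValueError (outside Pre_)
    else if pvCountCh str '>' (i + 1) (k + 1) = pvCountCh str '<' (i + 1) (k + 1) + 1 then
      some (name, PySem.Str.slice str (some (i + 1)) (some k))
    else pvBSearch str i name fuel k

def separateTemplateTypeParts_alt (str : String) (startI : Int) : String × String :=
  let i := PySem.Str.findFrom str "<" startI none  -- str.index('<', startI)
  if i = -1 then ("", "")  -- str.index raises ValueError (outside Pre_)
  else
    match pvBSearch str i (PySem.Str.slice str none (some i)) (PySem.Str.len str).toNat i with
    | some r => r
    | none => ("", "")  -- ValueError / non-termination of A's counterpart: outside Pre_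

-- ===== PRECONDITION & SPEC =====
-- Pre_ is where the Python A returns a (name, inner) pair from a plain forward scan:
-- startI ≥ 0 (negative startI makes A wrap indices and rescan the tail then the whole
-- string, an accident of range indexing that B's str.index-based search does not share),
-- a first '<' at or after startI, and a matching '>' closing it.  Outside Pre_, A raises
-- (AssertionError/IndexError), returns None (not a string pair), or wraps; B raises or
-- searches from the wrapped start there.
def Pre_separateTemplateTypeParts (str : String) (startI : Int) : Prop :=
  0 ≤ startI ∧
  ∃ i ∈ PySem.List.pyRange startI (PySem.Str.len str),
    PySem.Str.pyGet? str i = some '<' ∧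
    (∀ j ∈ PySem.List.pyRange startI i, PySem.Str.pyGet? str j ≠ some '<') ∧
    ∃ k ∈ PySem.List.pyRange (i + 1) (PySem.Str.len str),
      PySem.Str.pyGet? str k = some '>' ∧
      (PySem.List.pyRange (i + 1) k).countP (fun m => PySem.Str.pyGet? str m == some '<')
        = (PySem.List.pyRange (i + 1) k).countP (fun m => PySem.Str.pyGet? str m == some '>')
instance (str : String) (startI : Int) : Decidable (Pre_separateTemplateTypeParts str startI) := by
  unfold Pre_separateTemplateTypeParts; infer_instance

def pvWitness_separateTemplateTypeParts : String × Int := ("a<b>", 0)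

def Spec_separateTemplateTypeParts (str : String) (startI : Int) (out : String × String) : Prop := out = separateTemplateTypeParts_alt str startI
instance (str : String) (startI : Int) (out : String × String) : Decidable (Spec_separateTemplateTypeParts str startI out) := by unfold Spec_separateTemplateTypeParts; infer_instance

-- ===== CLAIM (what is proved, stated in full; the proofs are below) =====
def Claim_equal_separateTemplateTypeParts : Prop := ∀ (str : String) (startI : Int), Dom_separateTemplateTypeParts str startI → Pre_separateTemplateTypeParts str startI → Spec_separateTemplateTypeParts str startI (separateTemplateTypeParts str startI)

-- ===== LEMMAS AND PROOFS =====

theorem pvGetSome (str : String) (m : Int) (h0 : 0 ≤ m) (h1 : m < PySem.Str.len str) :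
    ∃ c, PySem.Str.pyGet? str m = some c := by
  lift m to Nat using h0
  simp only [PySem.Str.pyGet?_natCast]
  have : m < str.toList.length := by simpa [PySem.Str.len_eq] using h1
  exact ⟨str.toList[m], List.getElem?_eq_getElem this⟩

theorem pvCnt_split (str : String) (c : Char) (a m b : Int) (h1 : a ≤ m) (h2 : m ≤ b) :
    pvCountCh str c a b = pvCountCh str c a m + pvCountCh str c m b := by
  unfold pvCountCh
  rw [PySem.List.pyRange_one_append a m b h1 h2, List.countP_append]
  push_cast; ring

theorem pvCnt_nil (str : String) (c : Char) (a b : Int) (h : b ≤ a) :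
    pvCountCh str c a b = 0 := by
  unfold pvCountCh
  rw [PySem.List.pyRange_one_eq_nil h]
  rfl

theorem pvCnt_single (str : String) (c d : Char) (m : Int) (h : PySem.Str.pyGet? str m = some d) :
    pvCountCh str c m (m + 1) = if d = c then 1 else 0 := by
  unfold pvCountCh
  rw [PySem.List.pyRange_one_singleton]
  simp only [PySem.Str.pyGet?_eq, PySem.Chars.pyGet?_eq_listPyGet?] at h
  simp [List.countP, List.countP.go, h]
  by_cases h1 : d = c <;> simp [Bool.cond_eq_ite, beq_iff_eq, h1]

theorem pvCnt_zero (str : String) (c : Char) (a b : Int)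
    (h : ∀ m : Int, a ≤ m → m < b → PySem.Str.pyGet? str m ≠ some c) :
    pvCountCh str c a b = 0 := by
  unfold pvCountCh
  norm_cast
  rw [List.countP_eq_zero]
  intro m hm
  rw [PySem.List.mem_pyRange_one] at hm
  simpa using h m hm.1 hm.2

theorem pvA1_none (str : String) : ∀ (fuel : Nat) (s : Int), 0 ≤ s →
    (PySem.Str.len str - s).toNat ≤ fuel →
    (∀ m : Int, s ≤ m → m < PySem.Str.len str → PySem.Str.pyGet? str m ≠ some '<') →
    pvALoop1 str (PySem.List.pyRange s (PySem.Str.len str)) = none := by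
  intro fuel
  induction fuel with
  | zero =>
    intro s _ hf _
    rw [PySem.List.pyRange_one_eq_nil (by omega)]
    rfl
  | succ fuel ih =>
    intro s hs hf h
    by_cases hlt : s < PySem.Str.len str
    · rw [PySem.List.pyRange_one_cons hlt]
      obtain ⟨c, hc⟩ := pvGetSome str s hs hlt
      simp only [pvALoop1, hc]
      rw [if_neg (by intro hcc; exact h s le_rfl hlt (hcc ▸ hc))]
      exact ih (s + 1) (by omega) (by omega) (fun m hm1 hm2 => h m (by omega) hm2)
    · rw [PySem.List.pyRange_one_eq_nil (by omega)]
      rfl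

theorem pvA1_found (str : String) : ∀ (fuel : Nat) (s k : Int), 0 ≤ s →
    (PySem.Str.len str - s).toNat ≤ fuel →
    s ≤ k → k < PySem.Str.len str → PySem.Str.pyGet? str k = some '<' →
    (∀ m : Int, s ≤ m → m < k → PySem.Str.pyGet? str m ≠ some '<') →
    pvALoop1 str (PySem.List.pyRange s (PySem.Str.len str)) =
      some (k + 1, PySem.Str.slice str (some 0) (some k)) := by
  intro fuel
  induction fuel with
  | zero => intro s k _ hf hk1 hk2 _ _; omega
  | succ fuel ih =>
    intro s k hs hf hk1 hk2 hk3 hmin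
    have hlt : s < PySem.Str.len str := by omega
    rw [PySem.List.pyRange_one_cons hlt]
    obtain ⟨c, hc⟩ := pvGetSome str s hs hlt
    simp only [pvALoop1, hc]
    by_cases hsk : s = k
    · subst hsk
      rw [hc] at hk3
      have hce : c = '<' := by injection hk3
      rw [if_pos hce]
    · rw [if_neg (by intro hcc; exact hmin s le_rfl (by omega) (hcc ▸ hc))]
      exact ih (s + 1) k (by omega) (by omega) (by omega) hk2 hk3
        (fun m hm1 hm2 => hmin m (by omega) hm2)

theorem pvA2_walk (str : String) (i₁ : Int) (name : String) :
    ∀ (d : Nat) (s : Int) (L : Int), 0 ≤ s → s + (d : Int) ≤ PySem.Str.len str →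
    (∀ m : Int, s ≤ m → m < s + (d : Int) → PySem.Str.pyGet? str m ≠ some '>') →
    pvALoop2 str i₁ name (PySem.List.pyRange s (PySem.Str.len str)) L =
      pvALoop2 str i₁ name (PySem.List.pyRange (s + (d : Int)) (PySem.Str.len str))
        (L + pvCountCh str '<' s (s + (d : Int))) := by
  intro d
  induction d with
  | zero =>
    intro s L _ _ _
    have h0 : s + ((0 : Nat) : Int) = s := by push_cast; ring
    rw [h0, pvCnt_nil str '<' s s le_rfl, add_zero]
  | succ d ih =>
    intro s L hs hle h
    have hd1 : (((d + 1 : Nat)) : Int) = (d : Int) + 1 := by push_cast; ring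
    rw [hd1] at hle h ⊢
    have harith : s + ((d : Int) + 1) = (s + 1) + (d : Int) := by ring
    rw [harith] at hle h ⊢
    have hlt : s < PySem.Str.len str := by omega
    rw [PySem.List.pyRange_one_cons hlt]
    obtain ⟨c, hc⟩ := pvGetSome str s hs hlt
    simp only [pvALoop2, hc]
    have hsplit : pvCountCh str '<' s ((s + 1) + (d : Int))
        = pvCountCh str '<' s (s + 1) + pvCountCh str '<' (s + 1) ((s + 1) + (d : Int)) := by
      exact pvCnt_split str '<' s (s + 1) _ (by omega) (by omega)
    have hone := pvCnt_single str '<' c s hc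
    have hnogt : c ≠ '>' := by
      intro hcc; exact h s le_rfl (by omega) (hcc ▸ hc)
    have hnext : ∀ m : Int, s + 1 ≤ m → m < (s + 1) + (d : Int) → PySem.Str.pyGet? str m ≠ some '>' :=
      fun m hm1 hm2 => h m (by omega) hm2
    by_cases h1 : c = '<'
    · rw [if_pos h1]
      rw [ih (s + 1) (L + 1) (by omega) hle hnext, hsplit, hone, if_pos h1]
      ring_nf
    · rw [if_neg h1, if_neg hnogt]
      rw [ih (s + 1) L (by omega) hle hnext, hsplit, hone, if_neg h1]
      ring_nf

theorem pvSingletonPrefix (l : List Char) (c : Char) (j : Nat) :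
    [c] <+: l.drop j ↔ l[j]? = some c := by
  constructor
  · rintro ⟨t, ht⟩
    have h0 : (l.drop j)[0]? = some c := by rw [← ht]; rfl
    simpa [List.getElem?_drop] using h0
  · intro h
    have hlt : j < l.length := (List.getElem?_eq_some_iff.mp h).1
    have := List.drop_eq_getElem_cons hlt
    rw [this]
    have hc : l[j] = c := by simpa [List.getElem?_eq_getElem hlt] using h
    exact ⟨l.drop (j+1), by simp [hc]⟩

theorem pvSingletonInfix (l : List Char) (c : Char) : [c] <:+: l ↔ c ∈ l := by
  constructor
  · intro h; exact (List.singleton_sublist).mp h.sublist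
  · intro h
    obtain ⟨s, t, rfl⟩ := List.append_of_mem h
    exact ⟨s, t, by simp⟩

theorem pvGetNat (str : String) (m : Int) (h0 : 0 ≤ m) :
    PySem.Str.pyGet? str m = str.toList[m.toNat]? := by
  obtain ⟨n, rfl⟩ := Int.eq_ofNat_of_zero_le h0
  rw [PySem.Str.pyGet?_natCast]; simp

theorem pvFindChar (str : String) (c : Char) (sub : String) (hsub : sub.toList = [c])
    (t : Int) (ht : 0 ≤ t) :
    (PySem.Str.findFrom str sub t none = -1 ∧
       ∀ m : Int, t ≤ m → m < PySem.Str.len str → PySem.Str.pyGet? str m ≠ some c)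
    ∨ (∃ k : Nat, PySem.Str.findFrom str sub t none = (k : Int) ∧ t ≤ (k : Int) ∧
        (k : Int) < PySem.Str.len str ∧ PySem.Str.pyGet? str (k : Int) = some c ∧
        ∀ m : Int, t ≤ m → m < (k : Int) → PySem.Str.pyGet? str m ≠ some c) := by
  rw [PySem.Str.findFrom_eq, hsub]
  have hlen : PySem.Str.len str = (str.toList.length : Int) := by simp [PySem.Str.len_eq]
  set l := str.toList with hl
  by_cases hN : t ≤ (l.length : Int)
  · have htn : t = ((t.toNat : Nat) : Int) := (Int.toNat_of_nonneg ht).symm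
    have htl : t.toNat ≤ l.length := by omega
    rw [htn]
    by_cases hf : PySem.Chars.findFrom l [c] ((t.toNat : Nat) : Int) none = -1
    · left
      refine ⟨hf, ?_⟩
      intro m hm1 hm2 hget
      have h0m : 0 ≤ m := le_trans ht (by omega)
      have hml : m.toNat < l.length := by rw [hlen] at hm2; omega
      have hgl : l[m.toNat]? = some c := by
        rw [pvGetNat str m h0m] at hget; exact hget
      have hmem : c ∈ l.drop t.toNat := by
        have h2 : l[t.toNat + (m.toNat - t.toNat)]? = some c := by
          have h3 : t.toNat + (m.toNat - t.toNat) = m.toNat := by omega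
          rw [h3]; exact hgl
        rw [← List.getElem?_drop] at h2
        exact List.mem_of_getElem? h2
      have := (PySem.Chars.findFrom_natCast_eq_neg_one_iff l [c] t.toNat htl).mp hf
      exact this ((pvSingletonInfix _ c).mpr hmem)
    · right
      obtain ⟨hge, hpre, hmin⟩ := PySem.Chars.findFrom_natCast_spec l [c] t.toNat htl hf
      set f := PySem.Chars.findFrom l [c] ((t.toNat : Nat) : Int) none with hfdef
      have h0f : 0 ≤ f := le_trans (by omega) hge
      have hgf : l[f.toNat]? = some c := (pvSingletonPrefix l c f.toNat).mp hpre
      have hfl : f.toNat < l.length := (List.getElem?_eq_some_iff.mp hgf).1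
      refine ⟨f.toNat, by omega, by omega, by rw [hlen]; omega, ?_, ?_⟩
      · rw [PySem.Str.pyGet?_natCast]; exact hgf
      · intro m hm1 hm2 hget
        have h0m : 0 ≤ m := le_trans (by omega) hm1
        have hgl : l[m.toNat]? = some c := by
          rw [pvGetNat str m h0m] at hget; exact hget
        exact hmin m.toNat (by omega) (by omega) ((pvSingletonPrefix l c m.toNat).mpr hgl)
  · left
    constructor
    · simp only [PySem.Chars.findFrom]
      rw [if_pos (by split <;> omega)]
    · intro m hm1 hm2
      rw [hlen] at hm2; omega

theorem pvBridge (str : String) (i : Int) (name : String) (hi : 0 ≤ i) :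
    ∀ (fuel : Nat) (kprev L : Int), i ≤ kprev →
    (PySem.Str.len str - (kprev + 1)).toNat ≤ fuel →
    L = 1 + pvCountCh str '<' (i + 1) (kprev + 1) - pvCountCh str '>' (i + 1) (kprev + 1) →
    (∀ m : Int, i + 1 ≤ m → m < kprev + 1 →
       pvCountCh str '>' (i + 1) (m + 1) ≤ pvCountCh str '<' (i + 1) (m + 1)) →
    pvALoop2 str (i + 1) name (PySem.List.pyRange (kprev + 1) (PySem.Str.len str)) L =
      pvBSearch str i name fuel kprev := by
  intro fuel
  induction fuel with
  | zero =>
    intro kprev L hk hf _ _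
    rw [PySem.List.pyRange_one_eq_nil (by omega)]
    rfl
  | succ fuel ih =>
    intro kprev L hk hf hL hpos
    simp only [pvBSearch]
    set s : Int := kprev + 1 with hsdef
    have hs0 : 0 ≤ s := by omega
    -- base counts up to s
    have hbase : pvCountCh str '>' (i + 1) s ≤ pvCountCh str '<' (i + 1) s := by
      by_cases hki : kprev = i
      · subst hki
        rw [pvCnt_nil str '>' _ _ (by omega), pvCnt_nil str '<' _ _ (by omega)]
      · exact hpos kprev (by omega) (by omega)
    rcases pvFindChar str '>' ">" (by decide) s hs0 with ⟨hneg, hnone⟩ | ⟨k, hfk, hks, hkn, hkget, hkmin⟩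
    · -- no '>' at or after s: both none
      rw [hneg, if_pos rfl]
      by_cases hsn : s ≤ PySem.Str.len str
      · have := pvA2_walk str (i + 1) name (PySem.Str.len str - s).toNat s L hs0
          (by omega) (by intro m h1 h2; exact hnone m h1 (by omega))
        rw [this]
        rw [PySem.List.pyRange_one_eq_nil (by omega)]
        rfl
      · rw [PySem.List.pyRange_one_eq_nil (by omega)]
        rfl
    · -- first '>' at k
      rw [hfk]
      rw [if_neg (by omega)]
      -- A walks the '>'-free stretch [s, k)
      have hwalk := pvA2_walk str (i + 1) name ((k : Int) - s).toNat s L hs0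
        (by omega) (by intro m h1 h2; exact hkmin m h1 (by omega))
      have hcast : s + (((k : Int) - s).toNat : Int) = (k : Int) := by omega
      rw [hcast] at hwalk
      rw [hwalk, PySem.List.pyRange_one_cons (by omega : (k : Int) < PySem.Str.len str)]
      simp only [pvALoop2, hkget]
      rw [if_neg (by decide), if_pos trivial]
      -- count algebra
      set C₁ : Int := pvCountCh str '<' (i + 1) s with hC1
      set C₂ : Int := pvCountCh str '>' (i + 1) s with hC2
      set cs : Int := pvCountCh str '<' s (k : Int) with hcs
      have hzs : pvCountCh str '>' s (k : Int) = 0 :=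
        pvCnt_zero str '>' s (k : Int) (fun m h1 h2 => hkmin m h1 h2)
      have hsplit1 : pvCountCh str '<' (i + 1) ((k : Int) + 1)
          = C₁ + cs + pvCountCh str '<' (k : Int) ((k : Int) + 1) := by
        rw [pvCnt_split str '<' (i + 1) s ((k : Int) + 1) (by omega) (by omega),
            pvCnt_split str '<' s (k : Int) ((k : Int) + 1) (by omega) (by omega)]
        ring
      have hsplit2 : pvCountCh str '>' (i + 1) ((k : Int) + 1)
          = C₂ + 0 + pvCountCh str '>' (k : Int) ((k : Int) + 1) := by
        rw [pvCnt_split str '>' (i + 1) s ((k : Int) + 1) (by omega) (by omega),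
            pvCnt_split str '>' s (k : Int) ((k : Int) + 1) (by omega) (by omega), hzs, ← hC2]
        ring
      have hk1 : pvCountCh str '<' (k : Int) ((k : Int) + 1) = 0 := by
        rw [pvCnt_single str '<' '>' (k : Int) hkget]; simp
      have hk2 : pvCountCh str '>' (k : Int) ((k : Int) + 1) = 1 := by
        rw [pvCnt_single str '>' '>' (k : Int) hkget]; simp
      rw [hk1] at hsplit1
      rw [hk2] at hsplit2
      -- the test ↔ the level hitting zero
      by_cases htest : pvCountCh str '>' (i + 1) ((k : Int) + 1)
          = pvCountCh str '<' (i + 1) ((k : Int) + 1) + 1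
      · rw [if_pos htest]
        rw [if_pos (by omega)]
      · rw [if_neg htest]
        rw [if_neg (by omega)]
        -- recurse
        have hrec := ih (k : Int) (L + cs - 1) (by omega) (by omega)
          (by omega)
          (by
            intro m hm1 hm2
            by_cases hms : m < s
            · exact hpos m hm1 (by omega)
            · -- s ≤ m ≤ k
              have hsm : pvCountCh str '>' (i + 1) (m + 1) = C₂ + pvCountCh str '>' s (m + 1) := by
                rw [pvCnt_split str '>' (i + 1) s (m + 1) (by omega) (by omega)]
              have hsm2 : pvCountCh str '<' (i + 1) (m + 1) = C₁ + pvCountCh str '<' s (m + 1) := by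
                rw [pvCnt_split str '<' (i + 1) s (m + 1) (by omega) (by omega)]
              by_cases hmk : m < (k : Int)
              · have hz : pvCountCh str '>' s (m + 1) = 0 :=
                  pvCnt_zero str '>' s (m + 1) (fun j h1 h2 => hkmin j h1 (by omega))
                have hnn : 0 ≤ pvCountCh str '<' s (m + 1) := by
                  unfold pvCountCh; positivity
                omega
              · have hmeq : m = (k : Int) := by omega
                have hcsnn : 0 ≤ cs := by rw [hcs]; unfold pvCountCh; positivity
                rw [hmeq] at hsm hsm2 ⊢
                have hsz := pvCnt_split str '>' s (k : Int) ((k : Int) + 1) (by omega) (by omega)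
                have hsc := pvCnt_split str '<' s (k : Int) ((k : Int) + 1) (by omega) (by omega)
                -- level after k is ≥ 1 since the test failed and the invariant held
                omega)
        rw [← hrec]

theorem pvSliceZero (str : String) (b : Option Int) :
    PySem.Str.slice str (some 0) b = PySem.Str.slice str none b := by
  simp [PySem.Str.slice, PySem.Chars.slice, PySem.List.slice, PySem.List.clampIdx]

-- ===== VERDICT (by name: the statement is the Claim_ definition above) =====
theorem separateTemplateTypeParts_spec : Claim_equal_separateTemplateTypeParts := by
  intro str startI _ hpre
  obtain ⟨hst, -⟩ := hpre
  unfold Spec_separateTemplateTypeParts separateTemplateTypeParts separateTemplateTypeParts_alt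
  rcases pvFindChar str '<' "<" (by decide) startI hst with ⟨hneg, hnone⟩ |
    ⟨k, hfk, hks, hkn, hkget, hkmin⟩
  · -- no '<' at/after startI: A's first loop ends, B's index fails
    rw [pvA1_none str (PySem.Str.len str - startI).toNat startI hst le_rfl hnone]
    rw [hneg]
    simp
  · -- first '<' at k: A breaks there, B's index finds it; then the bridge
    rw [pvA1_found str (PySem.Str.len str - startI).toNat startI (k : Int) hst le_rfl hks hkn
      hkget hkmin]
    have hb := pvBridge str (k : Int) (PySem.Str.slice str (some 0) (some (k : Int)))
      (by omega) (PySem.Str.len str).toNat (k : Int) 1 le_rfl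
      (by omega)
      (by rw [pvCnt_nil str '<' ((k : Int) + 1) ((k : Int) + 1) le_rfl,
              pvCnt_nil str '>' ((k : Int) + 1) ((k : Int) + 1) le_rfl]
          omega)
      (by intro m h1 h2; omega)
    simp only [hfk, ← pvSliceZero str (some (k : Int))]
    rw [if_neg (by omega)]
    rw [hb]
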